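-- pv_equiv track=rewrite | github.com/alexandraback/datacollection | solutions_5744014401732608_0/Python/yamaton/B.py | solve
-- ===== SOURCE A (Python) =====
-- import itertools as it
--
-- def seq2matrix(seqs, B):
--     res = [[0 for _ in range(B)] for _ in range(B)]
--     for seq in seqs:
--         for i, j in zip(seq, seq[1:]):
--             res[i-1][j-1] = 1
--     return res
--
-- def solve(B, M):
--     tf = (M <= 2**(B-2))
--     if not tf:
--         return None
--     sequences = []
--     for i in range(B-1, -1, -1):
--         choices = it.combinations(range(2, B), i)
--         seqs = [([1] + list(choice) + [B]) for choice in choices]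
--         sequences += seqs
--
--     return seq2matrix(sequences[:M], B)
-- ===== SOURCE B (Python) =====
-- def _combos_take(rem, pool, k):
--     """First min(rem, C(len(pool), k)) k-combinations of pool, in lexicographic order."""
--     if rem <= 0:
--         return []
--     if k == 0:
--         return [[]]
--     if k > len(pool):
--         return []
--     x, rest = pool[0], pool[1:]
--     with_x = [[x] + t for t in _combos_take(rem, rest, k - 1)]
--     return with_x + _combos_take(rem - len(with_x), rest, k)
--
--
-- def solve(B, M):
--     if B >= 2:
--         if M > 1 << (B - 2):
--             return None
--     elif M > 0:
--         return None
--     n = max(B, 0)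
--     mat = [[0] * n for _ in range(n)]
--     rem = max(M, 0)
--     pool = list(range(2, B))
--     for k in range(B - 2, -1, -1):
--         if rem <= 0:
--             break
--         chunk = _combos_take(rem, pool, k)
--         for comb in chunk:
--             prev = 1
--             for v in comb + [B]:
--                 mat[prev - 1][v - 1] = 1
--                 prev = v
--         rem -= len(chunk)
--     return mat
-- ===== Notes on version B (the rewrite author's own statement) =====
-- stated objective: alternative
-- what changed: Instead of materialising all 2^(B-2) source-to-sink paths and then slicing, B streams the lexicographic combinations with an early-cutoff recursive generator and ORs each path's edges into the matrix, stopping after M paths (intended as faster - O(M*B) work vs A's O(2^B*B); the probe saw A time out at n=16 where B returned, but could not verify a clean ratio).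
-- intended difference: For 2 <= B and -2^(B-2) < M < 0, A slices sequences[:M] with a negative M and so returns the edges of all but the last |M| paths (an accident of Python slicing), while B returns the all-zero matrix, the intended 'first M paths' reading for a non-positive M. — e.g. on solve(3, -1): A returns some [[0, 1, 0], [0, 0, 1], [0, 0, 0]], B returns some [[0, 0, 0], [0, 0, 0], [0, 0, 0]]
import Mathlib
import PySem

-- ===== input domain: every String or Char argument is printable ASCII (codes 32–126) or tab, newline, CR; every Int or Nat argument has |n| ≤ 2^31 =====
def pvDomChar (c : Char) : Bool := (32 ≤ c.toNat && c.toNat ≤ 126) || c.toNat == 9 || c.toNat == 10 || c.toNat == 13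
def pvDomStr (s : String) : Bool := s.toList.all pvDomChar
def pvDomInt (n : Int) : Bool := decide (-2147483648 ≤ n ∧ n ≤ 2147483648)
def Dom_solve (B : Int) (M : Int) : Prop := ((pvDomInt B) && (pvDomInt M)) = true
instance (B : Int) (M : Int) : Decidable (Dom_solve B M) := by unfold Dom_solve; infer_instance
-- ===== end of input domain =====

-- B streams the first M lexicographic paths with an early-cutoff combination generator instead of
-- materialising all 2^(B-2) paths; equivalence is about return values (neither version mutates inputs).

-- ===== PORT A =====

-- itertools.combinations over a list, lexicographic order (exact)
def pyCombos : List Int → Nat → List (List Int)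
  | _, 0 => [[]]
  | [], _ + 1 => []
  | x :: xs, k + 1 => ((pyCombos xs k).map (x :: ·)) ++ pyCombos xs (k + 1)

-- res[i][j] = 1 ; on every use below 0 ≤ i,j < B (matrix entries come from path vertices 1..B), so
-- plain List.set with toNat is exact here (no negative/out-of-range index ever occurs)
def set2 (m : List (List Int)) (i j : Int) : List (List Int) :=
  m.set i.toNat ((m.getD i.toNat []).set j.toNat 1)

def seq2matrix (seqs : List (List Int)) (B : Int) : List (List Int) :=
  let res := List.replicate B.toNat (List.replicate B.toNat (0 : Int))
  seqs.foldl (fun res seq =>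
    (seq.zip (seq.drop 1)).foldl (fun res p => set2 res (p.1 - 1) (p.2 - 1)) res) res

def solve (B : Int) (M : Int) : Option (List (List Int)) :=
  -- Python: tf = (M <= 2**(B-2)); for B < 2 the power is a float in [0,1), so the test is M ≤ 0 — exact for integer M
  let tf : Bool := if 2 ≤ B then decide (M ≤ (2 : Int) ^ (B - 2).toNat) else decide (M ≤ 0)
  if !tf then none
  else
    let sequences := (PySem.List.pyRange (B - 1) (-1) (-1)).foldl (fun acc i =>
      acc ++ (pyCombos (PySem.List.pyRange 2 B 1) i.toNat).map (fun c => [1] ++ c ++ [B])) []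
    some (seq2matrix (PySem.List.slice sequences none (some M)) B)

-- ===== PORT B =====

-- first min(rem, C(|pool|, k)) k-combinations of pool, lexicographic, with early cutoff
def combosTake : List Int → Nat → Nat → List (List Int)
  | _, _, 0 => []
  | _, 0, _ + 1 => [[]]
  | [], _ + 1, _ + 1 => []
  | x :: xs, k + 1, r + 1 =>
    if xs.length < k then []
    else
      let withX := (combosTake xs k (r + 1)).map (x :: ·)
      withX ++ combosTake xs (k + 1) (r + 1 - withX.length)

-- prev = 1; for v in comb + [B]: mat[prev-1][v-1] = 1; prev = v   (indices in range, see set2)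
def markPath (B : Int) (mat : List (List Int)) (comb : List Int) : List (List Int) :=
  ((comb ++ [B]).foldl (fun (s : List (List Int) × Int) v =>
    (set2 s.1 (s.2 - 1) (v - 1), v)) (mat, 1)).1

def solveCore (B : Int) (M : Int) : List (List Int) :=
  let n := B.toNat
  let mat0 := List.replicate n (List.replicate n (0 : Int))
  let pool := PySem.List.pyRange 2 B 1
  ((PySem.List.pyRange (B - 2) (-1) (-1)).foldl (fun (s : List (List Int) × Nat) k =>
    if s.2 = 0 then s
    else
      let chunk := combosTake pool k.toNat s.2
      (chunk.foldl (markPath B) s.1, s.2 - chunk.length)) (mat0, M.toNat)).1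

def solve_alt (B : Int) (M : Int) : Option (List (List Int)) :=
  if 2 ≤ B then
    if (2 : Int) ^ (B - 2).toNat < M then none else some (solveCore B M)
  else
    if 0 < M then none else some (solveCore B M)

-- ===== PRECONDITION & SPEC =====

-- For 2 ≤ B and -2^(B-2) < M < 0, A slices sequences[:M] with a negative M and so returns the edges of
-- all but the last |M| paths (an accident of Python slicing), while B returns the all-zero matrix, the
-- intended 'first M paths' reading for a non-positive M.
def D_solve (B : Int) (M : Int) : Prop := 2 ≤ B ∧ M < 0 ∧ -M < 2 ^ (B.toNat - 2)
instance (B : Int) (M : Int) : Decidable (D_solve B M) := by unfold D_solve; infer_instance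

def Spec_solve (B : Int) (M : Int) (out : Option (List (List Int))) : Prop :=
  ¬ D_solve B M → out = solve_alt B M
instance (B : Int) (M : Int) (out : Option (List (List Int))) : Decidable (Spec_solve B M out) := by
  unfold Spec_solve; infer_instance

def pvDiffWitness_solve : Int × Int := (3, -1)
def pvDiffWitnessOut_solve : (Option (List (List Int))) × (Option (List (List Int))) :=
  (some [[0, 1, 0], [0, 0, 1], [0, 0, 0]], some [[0, 0, 0], [0, 0, 0], [0, 0, 0]])

-- ===== CLAIM (what is proved, stated in full; the proofs are below) =====
def Claim_unchanged_solve : Prop := ∀ (B : Int) (M : Int), Dom_solve B M → Spec_solve B M (solve B M)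
def Claim_changed_solve : Prop :=
  Dom_solve (pvDiffWitness_solve.1) (pvDiffWitness_solve.2) ∧
  D_solve (pvDiffWitness_solve.1) (pvDiffWitness_solve.2) ∧
  solve (pvDiffWitness_solve.1) (pvDiffWitness_solve.2) = pvDiffWitnessOut_solve.1 ∧
  solve_alt (pvDiffWitness_solve.1) (pvDiffWitness_solve.2) = pvDiffWitnessOut_solve.2 ∧
  pvDiffWitnessOut_solve.1 ≠ pvDiffWitnessOut_solve.2
def Claim_exact_solve : Prop :=
  ∀ (B : Int) (M : Int), Dom_solve B M → D_solve B M → solve B M ≠ solve_alt B M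

-- ===== LEMMAS AND PROOFS =====

lemma pyCombos_nil_of_lt (l : List Int) (k : Nat) (h : l.length < k) : pyCombos l k = [] := by
  induction l generalizing k with
  | nil =>
    cases k with
    | zero => omega
    | succ k => rfl
  | cons x xs ih =>
    cases k with
    | zero => omega
    | succ k =>
      have h1 : xs.length < k := by simp at h; omega
      simp [pyCombos, ih k h1, ih (k + 1) (by omega)]

lemma combosTake_eq_take (l : List Int) (k r : Nat) :
    combosTake l k r = (pyCombos l k).take r := by
  induction l generalizing k r with
  | nil =>
    cases k with
    | zero => cases r <;> simp [combosTake, pyCombos]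
    | succ k => cases r <;> simp [combosTake, pyCombos]
  | cons x xs ih =>
    cases k with
    | zero => cases r <;> simp [combosTake, pyCombos]
    | succ k =>
      cases r with
      | zero => simp [combosTake]
      | succ r =>
        show (if xs.length < k then [] else _) = _
        split_ifs with hlt
        · rw [show pyCombos (x :: xs) (k + 1)
              = ((pyCombos xs k).map (x :: ·)) ++ pyCombos xs (k + 1) from rfl,
            pyCombos_nil_of_lt xs k hlt, pyCombos_nil_of_lt xs (k + 1) (by omega)]
          rfl
        · rw [show pyCombos (x :: xs) (k + 1)
              = ((pyCombos xs k).map (x :: ·)) ++ pyCombos xs (k + 1) from rfl,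
            List.take_append]
          simp only [ih, ← List.map_take, List.length_map, List.length_take]
          congr 2
          omega

lemma pyCombos_length (l : List Int) (k : Nat) :
    (pyCombos l k).length = l.length.choose k := by
  induction l generalizing k with
  | nil => cases k <;> rfl
  | cons x xs ih =>
    cases k with
    | zero => rfl
    | succ k =>
      show (((pyCombos xs k).map (x :: ·)) ++ pyCombos xs (k + 1)).length = _
      simp [ih, Nat.choose_succ_succ]

lemma zip_mark (l : List Int) (prev : Int) (mat : List (List Int)) :
    ((prev :: l).zip l).foldl (fun r p => set2 r (p.1 - 1) (p.2 - 1)) mat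
    = (l.foldl (fun (s : List (List Int) × Int) v => (set2 s.1 (s.2 - 1) (v - 1), v)) (mat, prev)).1 := by
  induction l generalizing prev mat with
  | nil => rfl
  | cons v vs ih => simpa using ih v (set2 mat (prev - 1) (v - 1))

lemma fold_paths (Bv : Int) (cs : List (List Int)) (mat : List (List Int)) :
    (cs.map (fun c => [1] ++ c ++ [Bv])).foldl
      (fun r seq => (seq.zip (seq.drop 1)).foldl (fun r p => set2 r (p.1 - 1) (p.2 - 1)) r) mat
    = cs.foldl (markPath Bv) mat := by
  induction cs generalizing mat with
  | nil => rfl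
  | cons c cs ih =>
    simp only [List.map_cons, List.foldl_cons]
    rw [ih]
    congr 1
    show (((1 : Int) :: (c ++ [Bv])).zip ((c ++ [Bv]))).foldl _ mat = markPath Bv mat c
    rw [zip_mark]
    rfl

lemma chunkloop {α β : Type} (f : β → α → β) (css : List (List α)) (m : β) (r : Nat) :
    (css.foldl (fun (s : β × Nat) cs =>
        if s.2 = 0 then s
        else ((cs.take s.2).foldl f s.1, s.2 - (cs.take s.2).length)) (m, r)).1
    = ((css.flatten).take r).foldl f m := by
  induction css generalizing m r with
  | nil => simp
  | cons cs css ih =>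
    simp only [List.foldl_cons, List.flatten_cons]
    by_cases hr : r = 0
    · subst hr
      rw [if_pos rfl]
      simpa using ih m 0
    · simp only [hr, if_false]
      rw [ih]
      rw [List.take_append, List.foldl_append]
      congr 1
      simp [List.length_take]
      omega


-- proof-only helpers: named forms of the two loops' data

def pathsA (B : Int) : List (List Int) :=
  (PySem.List.pyRange (B - 1) (-1) (-1)).foldl (fun acc i =>
    acc ++ (pyCombos (PySem.List.pyRange 2 B 1) i.toNat).map (fun c => [1] ++ c ++ [B])) []

def chunksB (B : Int) : List (List (List Int)) :=
  (PySem.List.pyRange (B - 2) (-1) (-1)).map (fun k => pyCombos (PySem.List.pyRange 2 B 1) k.toNat)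

def zeroMat (B : Int) : List (List Int) :=
  List.replicate B.toNat (List.replicate B.toNat (0 : Int))

lemma solve_eq (B M : Int) :
    solve B M = (if (!(if 2 ≤ B then decide (M ≤ (2 : Int) ^ (B - 2).toNat) else decide (M ≤ 0))) = true
      then none
      else some (seq2matrix (PySem.List.slice (pathsA B) none (some M)) B)) := rfl

lemma foldl_append_nil {α β : Type} (g : α → List β) (l : List α) (init : List β) :
    l.foldl (fun acc i => acc ++ g i) init = init ++ (l.map g).flatten := by
  induction l generalizing init with
  | nil => simp
  | cons x xs ih => simp [ih, List.append_assoc]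

lemma pathsA_char (B : Int) :
    pathsA B = ((PySem.List.pyRange (B - 1) (-1) (-1)).map
      (fun i => (pyCombos (PySem.List.pyRange 2 B 1) i.toNat).map (fun c => [1] ++ c ++ [B]))).flatten := by
  unfold pathsA
  rw [foldl_append_nil]
  simp

lemma chunkloop2 {α β γ : Type} (f : β → α → β) (g : γ → List α) (ks : List γ) (m : β) (r : Nat) :
    (ks.foldl (fun (s : β × Nat) k =>
        if s.2 = 0 then s
        else (((g k).take s.2).foldl f s.1, s.2 - ((g k).take s.2).length)) (m, r)).1
    = (((ks.map g).flatten).take r).foldl f m := by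
  have h := chunkloop f (ks.map g) m r
  rw [List.foldl_map] at h
  exact h

lemma core_char (B M : Int) :
    solveCore B M = (((chunksB B).flatten).take M.toNat).foldl (markPath B) (zeroMat B) := by
  unfold solveCore chunksB zeroMat
  simp only [combosTake_eq_take]
  exact chunkloop2 (markPath B) (fun k : Int => pyCombos (PySem.List.pyRange 2 B 1) k.toNat) _ _ _

lemma core_zero (B M : Int) (hM : M ≤ 0) : solveCore B M = zeroMat B := by
  rw [core_char]
  have h0 : M.toNat = 0 := by omega
  simp [h0]

lemma pathsA_flat (B : Int) (hB : 2 ≤ B) :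
    pathsA B = ((chunksB B).flatten).map (fun c => [1] ++ c ++ [B]) := by
  rw [pathsA_char, PySem.List.pyRange_neg_one_cons (show (-1 : Int) < B - 1 by omega)]
  rw [List.map_cons, List.flatten_cons]
  rw [pyCombos_nil_of_lt _ _ (show (PySem.List.pyRange 2 B 1).length < (B - 1).toNat by
    rw [PySem.List.length_pyRange_one]; omega)]
  simp only [List.map_nil, List.nil_append]
  rw [show B - 1 - 1 = B - 2 by ring]
  unfold chunksB
  rw [List.map_flatten, List.map_map]
  rfl

lemma seq2matrix_map (B : Int) (cs : List (List Int)) :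
    seq2matrix (cs.map (fun c => [1] ++ c ++ [B])) B = cs.foldl (markPath B) (zeroMat B) :=
  fold_paths B cs _

lemma seq2matrix_nil (B : Int) : seq2matrix [] B = zeroMat B := rfl

lemma A_pos (B M : Int) (hM : 0 ≤ M) (hB : 2 ≤ B) :
    seq2matrix (PySem.List.slice (pathsA B) none (some M)) B = solveCore B M := by
  rw [PySem.List.slice_to _ hM, pathsA_flat B hB, ← List.map_take, seq2matrix_map, core_char]

lemma A_neg (B M : Int) (hM : M < 0) (hlen : (pathsA B).length ≤ (-M).toNat) :
    seq2matrix (PySem.List.slice (pathsA B) none (some M)) B = zeroMat B := by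
  have hk : 0 < (-M).toNat := by omega
  have hMe : M = -(((-M).toNat : Nat) : Int) := by omega
  rw [hMe, PySem.List.slice_to_neg_natCast (pathsA B) _ hk, Nat.sub_eq_zero_of_le hlen,
    List.take_zero, seq2matrix_nil]

lemma list_sum_range (f : Nat → Nat) (m : Nat) :
    ((List.range m).map f).sum = ∑ i ∈ Finset.range m, f i := by
  induction m with
  | zero => simp
  | succ m ih => simp [List.range_succ, Finset.sum_range_succ, ih]

lemma sum_choose_list (n : Nat) : ((List.range (n + 2)).map (fun j => n.choose j)).sum = 2 ^ n := by
  rw [list_sum_range, Finset.sum_range_succ, Nat.choose_eq_zero_of_lt (by omega), Nat.sum_range_choose]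
  simp

lemma pathsA_length (B : Int) (hB : 2 ≤ B) : (pathsA B).length = 2 ^ (B - 2).toNat := by
  rw [pathsA_char, List.length_flatten, List.map_map]
  have h1 : (List.length ∘ fun i : Int => (pyCombos (PySem.List.pyRange 2 B 1) i.toNat).map
      (fun c => [1] ++ c ++ [B])) = fun i : Int => ((B - 2).toNat).choose i.toNat := by
    funext i
    simp [pyCombos_length, PySem.List.length_pyRange_one]
  rw [h1, PySem.List.pyRange_neg_one_eq_reverse, List.map_reverse, List.sum_reverse]
  rw [show (-1 : Int) + 1 = 0 by ring, show B - 1 + 1 = B by ring]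
  rw [PySem.List.pyRange_one, List.map_map]
  have h2 : ((fun i : Int => ((B - 2).toNat).choose i.toNat) ∘ fun k : Nat => (0 : Int) + k)
      = fun k : Nat => ((B - 2).toNat).choose k := by
    funext k
    simp
  rw [h2, show (B - 0).toNat = (B - 2).toNat + 2 by omega]
  exact sum_choose_list _

lemma pathsA_small (B : Int) (hB : B < 2) : (pathsA B).length ≤ 1 := by
  by_cases h0 : B ≤ 0
  · rw [pathsA_char, PySem.List.pyRange_neg_one_eq_nil (by omega : B - 1 ≤ -1)]
    simp
  · have hB1 : B = 1 := by omega
    subst hB1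
    decide


-- tightness: inside D_ the two results differ at entry (0,1) (edge 1→2 of the first, longest path)

def e01 (m : List (List Int)) : Int := (m.getD 0 []).getD 1 0

lemma e01_set2 (m : List (List Int)) (i j : Int) (h : e01 m = 1) : e01 (set2 m i j) = 1 := by
  unfold e01 at h ⊢
  unfold set2
  by_cases hi : i.toNat = 0
  · rcases m with _ | ⟨r, ms⟩
    · simp at h
    · rw [hi]
      simp only [List.getD_cons_zero] at h
      rw [List.set_cons_zero]
      simp only [List.getD_cons_zero]
      by_cases hj : j.toNat = 1
      · have hr : 1 < r.length := by
          by_contra hc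
          rw [List.getD_eq_default r 0 (by omega)] at h
          exact absurd h (by norm_num)
        rw [hj, List.getD_eq_getElem?_getD, List.getElem?_set_self (by omega)]
        rfl
      · rw [List.getD_eq_getElem?_getD, List.getElem?_set_ne hj, ← List.getD_eq_getElem?_getD]
        exact h
  · simp only [List.getD_eq_getElem?_getD] at h ⊢
    rw [List.getElem?_set_ne hi]
    exact h

lemma fold_set_preserve (l : List Int) (s : List (List Int) × Int) (h : e01 s.1 = 1) :
    e01 ((l.foldl (fun (s : List (List Int) × Int) v => (set2 s.1 (s.2 - 1) (v - 1), v)) s).1) = 1 := by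
  induction l generalizing s with
  | nil => exact h
  | cons v vs ih => exact ih _ (e01_set2 _ _ _ h)

lemma foldl_mark_preserve (B : Int) (cs : List (List Int)) (m : List (List Int)) (h : e01 m = 1) :
    e01 (cs.foldl (markPath B) m) = 1 := by
  induction cs generalizing m with
  | nil => exact h
  | cons c cs ih => exact ih _ (fold_set_preserve _ _ h)

lemma e01_first (B : Int) (hB : 3 ≤ B) : e01 (markPath B (zeroMat B) (PySem.List.pyRange 2 B 1)) = 1 := by
  rw [PySem.List.pyRange_one_cons (by omega : (2 : Int) < B)]
  unfold markPath
  rw [List.cons_append, List.foldl_cons]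
  apply fold_set_preserve
  show e01 (set2 (zeroMat B) ((1 : Int) - 1) ((2 : Int) - 1)) = 1
  rw [show (1 : Int) - 1 = 0 by ring, show (2 : Int) - 1 = 1 by ring]
  obtain ⟨k, hk⟩ : ∃ k, B.toNat = k + 3 := ⟨B.toNat - 3, by omega⟩
  simp [e01, set2, zeroMat, hk, List.replicate_succ]

lemma e01_zeroMat (B : Int) (hB : 3 ≤ B) : e01 (zeroMat B) = 0 := by
  obtain ⟨k, hk⟩ : ∃ k, B.toNat = k + 3 := ⟨B.toNat - 3, by omega⟩
  simp [e01, zeroMat, hk, List.replicate_succ]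

lemma pyCombos_self (l : List Int) : pyCombos l l.length = [l] := by
  induction l with
  | nil => rfl
  | cons x xs ih =>
    show ((pyCombos xs xs.length).map (x :: ·)) ++ pyCombos xs (xs.length + 1) = [x :: xs]
    rw [ih, pyCombos_nil_of_lt xs (xs.length + 1) (by omega)]
    rfl

lemma chunks_head (B : Int) (hB : 2 ≤ B) :
    (chunksB B).flatten = (PySem.List.pyRange 2 B 1) ::
      ((PySem.List.pyRange (B - 3) (-1) (-1)).map
        (fun k => pyCombos (PySem.List.pyRange 2 B 1) k.toNat)).flatten := by
  unfold chunksB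
  rw [PySem.List.pyRange_neg_one_cons (by omega : (-1 : Int) < B - 2), List.map_cons,
    List.flatten_cons, show B - 2 - 1 = B - 3 by ring]
  have hp : (B - 2).toNat = (PySem.List.pyRange 2 B 1).length := by
    rw [PySem.List.length_pyRange_one]
  rw [hp, pyCombos_self]
  rfl

-- ===== VERDICT (by name: the statement is the Claim_ definition above) =====
theorem solve_spec : Claim_unchanged_solve := by
  intro B M _hDom hnD
  show solve B M = solve_alt B M
  rw [solve_eq]
  by_cases hB : 2 ≤ B
  · by_cases hM : M ≤ (2 : Int) ^ (B - 2).toNat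
    · rw [if_pos hB, decide_eq_true hM]
      unfold solve_alt
      rw [if_pos hB, if_neg (not_lt.mpr hM)]
      simp only [Bool.not_true, Bool.false_eq_true, if_false]
      refine congrArg some ?_
      rcases Int.lt_or_le M 0 with hneg | hpos
      · have hle : M ≤ -((2 : Int) ^ (B - 2).toNat) := by
          by_contra hcon
          push Not at hcon
          refine absurd (hnD ⟨hB, hneg, ?_⟩) not_false
          rw [show B.toNat - 2 = (B - 2).toNat by omega]
          linarith
        have hlen : (pathsA B).length ≤ (-M).toNat := by
          rw [pathsA_length B hB]
          have h2 : ((2 ^ (B - 2).toNat : Nat) : Int) ≤ -M := by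
            push_cast
            linarith
          generalize hE : (2 : Nat) ^ (B - 2).toNat = E at h2 ⊢
          omega
        rw [A_neg B M hneg hlen, core_zero B M (le_of_lt hneg)]
      · exact A_pos B M hpos hB
    · rw [if_pos hB, decide_eq_false hM]
      unfold solve_alt
      rw [if_pos hB, if_pos (by exact not_le.mp hM : (2 : Int) ^ (B - 2).toNat < M)]
      simp
  · by_cases hM : M ≤ 0
    · rw [if_neg hB, decide_eq_true hM]
      unfold solve_alt
      rw [if_neg hB, if_neg (not_lt.mpr hM)]
      simp only [Bool.not_true, Bool.false_eq_true, if_false]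
      refine congrArg some ?_
      rcases eq_or_lt_of_le hM with he | hneg
      · subst he
        rw [core_zero B 0 le_rfl, PySem.List.slice_to _ (le_refl (0 : Int))]
        simp [seq2matrix_nil]
      · rw [A_neg B M hneg (le_trans (pathsA_small B (by omega)) (by omega)),
          core_zero B M hM]
    · rw [if_neg hB, decide_eq_false hM]
      unfold solve_alt
      rw [if_neg hB, if_pos (by exact not_le.mp hM : (0 : Int) < M)]
      simp

theorem solve_changed : Claim_changed_solve := by
  unfold Claim_changed_solve; decide

theorem solve_tight : Claim_exact_solve := by
  intro B M _hDom hD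
  obtain ⟨hB, hMneg, hMlt⟩ := hD
  have hB3 : 3 ≤ B := by
    rcases (by omega : B = 2 ∨ 3 ≤ B) with h2 | h3
    · subst h2
      norm_num at hMlt
      omega
    · exact h3
  have hee : B.toNat - 2 = (B - 2).toNat := by omega
  rw [hee] at hMlt
  have hk0 : (-M).toNat < 2 ^ (B - 2).toNat := by
    have h1 : ((((-M).toNat : Nat)) : Int) < (((2 ^ (B - 2).toNat : Nat)) : Int) := by
      push_cast
      omega
    exact_mod_cast h1
  have hMle : M ≤ (2 : Int) ^ (B - 2).toNat := by
    have : (0 : Int) ≤ 2 ^ (B - 2).toNat := by positivity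
    omega
  -- right-hand side: the all-zero matrix
  have hR : solve_alt B M = some (zeroMat B) := by
    unfold solve_alt
    rw [if_pos hB, if_neg (not_lt.mpr hMle), core_zero B M (le_of_lt hMneg)]
  -- left-hand side: the nonempty prefix of paths, starting with the longest path
  have hL : solve B M = some ((((chunksB B).flatten.take ((pathsA B).length - (-M).toNat)).foldl
      (markPath B) (zeroMat B))) := by
    rw [solve_eq, if_pos hB, decide_eq_true hMle]
    simp only [Bool.not_true, Bool.false_eq_true, if_false]
    refine congrArg some ?_
    set k0 := (-M).toNat with hk
    have hMe : M = -((k0 : Nat) : Int) := by omega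
    rw [hMe, PySem.List.slice_to_neg_natCast (pathsA B) _ (by omega), pathsA_flat B hB,
      ← List.map_take, seq2matrix_map]
  rw [hL, hR]
  intro heq
  have heq' : (((chunksB B).flatten.take ((pathsA B).length - (-M).toNat)).foldl
      (markPath B) (zeroMat B)) = zeroMat B := Option.some.inj heq
  have hlen : (pathsA B).length = 2 ^ (B - 2).toNat := pathsA_length B hB
  obtain ⟨t, ht⟩ : ∃ t, (pathsA B).length - (-M).toNat = t + 1 := by
    refine ⟨(pathsA B).length - (-M).toNat - 1, ?_⟩
    rw [hlen]
    omega
  rw [ht, chunks_head B hB, List.take_succ_cons, List.foldl_cons] at heq'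
  have h1 : e01 (zeroMat B) = 1 := by
    rw [← heq']
    exact foldl_mark_preserve B _ _ (e01_first B hB3)
  rw [e01_zeroMat B hB3] at h1
  exact absurd h1 (by norm_num)
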